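-- pv_equiv track=rewrite | github.com/modlix-india/nocode-kirun | kirun-py/src/kirun_py/function/system/context/set_function.py | _parse_bracket_segments
-- ===== SOURCE A (Python) =====
-- from typing import Any, Dict, List, Optional, TYPE_CHECKING
--
-- def _parse_bracket_segments(part: str) -> List[str]:
--     segments: List[str] = []
--     start = 0
--     i = 0
--
--     while i < len(part):
--         if part[i] == '[':
--             if i > start:
--                 segments.append(part[start:i])
--             end = i + 1
--             in_quote = False
--             quote_char = ''
--             while end < len(part):
--                 if in_quote:
--                     if part[end] == quote_char and part[end - 1] != '\\':
--                         in_quote = False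
--                 else:
--                     if part[end] in ('"', "'"):
--                         in_quote = True
--                         quote_char = part[end]
--                     elif part[end] == ']':
--                         break
--                 end += 1
--             segments.append(part[i + 1:end])
--             start = end + 1
--             i = start
--         else:
--             i += 1
--
--     if start < len(part):
--         segments.append(part[start:])
--
--     return segments if segments else [part]
-- ===== SOURCE B (Python) =====
-- from typing import List
--
--
-- def _find_close(s: str):
--     """Index of the unescaped, unquoted ']' in s, or None."""
--     in_quote = False
--     quote_char = ''
--     prev = '['
--     for k, c in enumerate(s):
--         if in_quote:
--             if c == quote_char and prev != '\\':
--                 in_quote = False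
--         elif c in ('"', "'"):
--             in_quote = True
--             quote_char = c
--         elif c == ']':
--             return k
--         prev = c
--     return None
--
--
-- def _parse_bracket_segments(part: str) -> List[str]:
--     segments: List[str] = []
--     rest = part
--     while rest:
--         j = rest.find('[')
--         if j < 0:
--             segments.append(rest)
--             break
--         if j > 0:
--             segments.append(rest[:j])
--         rest = rest[j + 1:]
--         k = _find_close(rest)
--         if k is None:
--             segments.append(rest)
--             rest = ''
--         else:
--             segments.append(rest[:k])
--             rest = rest[k + 1:]
--     return segments if segments else [part]
-- ===== Notes on version B (the rewrite author's own statement) =====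
-- stated objective: faster
-- what changed: Replaces A's nested index-based while loops over the whole string (start/i/end cursors with slice arithmetic) by a suffix-consuming loop: str.find locates the next opening bracket, a separate helper returns the index of the matching close bracket in the remaining suffix, and the string is repeatedly shortened; no absolute indices are kept.
import Mathlib
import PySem

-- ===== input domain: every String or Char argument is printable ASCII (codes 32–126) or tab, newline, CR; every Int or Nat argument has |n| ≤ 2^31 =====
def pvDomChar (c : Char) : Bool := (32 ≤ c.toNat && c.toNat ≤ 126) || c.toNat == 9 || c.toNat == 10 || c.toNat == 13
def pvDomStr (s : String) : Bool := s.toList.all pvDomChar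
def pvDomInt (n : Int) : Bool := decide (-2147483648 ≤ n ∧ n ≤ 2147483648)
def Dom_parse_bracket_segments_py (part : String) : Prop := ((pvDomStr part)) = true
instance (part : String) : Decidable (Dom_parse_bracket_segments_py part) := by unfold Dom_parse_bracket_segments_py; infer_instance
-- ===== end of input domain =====

-- B replaces A's nested index-based scans (start/i/end cursors over the whole string) by a
-- suffix-consuming loop: find the next '[', a helper returns the index of the matching close
-- bracket in the remaining suffix, and the string is repeatedly shortened (objective: alternative).

-- ===== PORT A =====
-- Strings are handled as their character lists; Python's quote_char = '' placeholder (never read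
-- before being assigned) is ported as the NUL character.
-- Python slice part[a:b] with 0 ≤ a ≤ b (always the case here) is (l.drop a).take (b - a),
-- part[a:] is l.drop a, part[e-1] with 1 ≤ e is l.getD (e-1) default — exact on these indices.

-- inner `while end < len(part)` loop of A: returns the final value of `end`
def aInner (l : List Char) (e : Nat) (inQ : Bool) (qc : Char) : Nat :=
  if h : e < l.length then
    if inQ then
      if l[e] == qc && l.getD (e - 1) default != '\\' then aInner l (e + 1) false qc
      else aInner l (e + 1) true qc
    else if l[e] == '"' || l[e] == '\'' then aInner l (e + 1) true (l[e])
    else if l[e] == ']' then e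
    else aInner l (e + 1) false qc
  else e
termination_by l.length - e
decreasing_by all_goals exact Nat.sub_succ_lt_self l.length e h

-- outer `while i < len(part)` loop of A; the fuel argument only makes the loop total:
-- it starts at l.length + 1 and cannot run out, since every iteration increases i
def aOuter (l : List Char) : Nat → Nat → Nat → List String → List String
  | 0, start, _, segs =>
    if start < l.length then segs ++ [String.mk (l.drop start)] else segs
  | fuel + 1, start, i, segs =>
    if h : i < l.length then
      if l[i] == '[' then
        let segs1 := if start < i then segs ++ [String.mk ((l.drop start).take (i - start))] else segs
        let e := aInner l (i + 1) false (Char.ofNat 0)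
        let segs2 := segs1 ++ [String.mk ((l.drop (i + 1)).take (e - (i + 1)))]
        aOuter l fuel (e + 1) (e + 1) segs2
      else aOuter l fuel start (i + 1) segs
    else
      if start < l.length then segs ++ [String.mk (l.drop start)] else segs

def parse_bracket_segments_py (part : String) : List String :=
  let segs := aOuter part.toList (part.toList.length + 1) 0 0 []
  if segs.isEmpty then [part] else segs

-- ===== PORT B =====
-- port of Source B's _find_close: `for k, c in enumerate(s)` with prev/in_quote/quote_char state
def bFindAux (s : List Char) (k : Nat) (prev : Char) (inQ : Bool) (qc : Char) : Option Nat :=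
  match s with
  | [] => none
  | c :: t =>
    if inQ then
      if c == qc && prev != '\\' then bFindAux t (k + 1) c false qc
      else bFindAux t (k + 1) c true qc
    else if c == '"' || c == '\'' then bFindAux t (k + 1) c true c
    else if c == ']' then some k
    else bFindAux t (k + 1) c false qc

def bFind (s : List Char) : Option Nat := bFindAux s 0 '[' false (Char.ofNat 0)

-- port of Source B's `while rest:` loop; rest.find('[') is ported as List.findIdx?
def bOuter (rest : List Char) (segs : List String) : List String :=
  if rest.isEmpty then segs
  else
    match rest.findIdx? (· == '[') with
    | none => segs ++ [String.mk rest]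
    | some j =>
      let segs1 := if 0 < j then segs ++ [String.mk (rest.take j)] else segs
      let rest2 := rest.drop (j + 1)
      match bFind rest2 with
      | none => segs1 ++ [String.mk rest2]
      | some k => bOuter (rest2.drop (k + 1)) (segs1 ++ [String.mk (rest2.take k)])
termination_by rest.length
decreasing_by
  rw [List.length_drop, List.length_drop]
  exact Nat.lt_of_le_of_lt (Nat.sub_le _ _)
    (Nat.sub_lt (List.length_pos_of_ne_nil (by simp_all)) (Nat.succ_pos j))

def parse_bracket_segments_py_alt (part : String) : List String :=
  let segs := bOuter part.toList []
  if segs.isEmpty then [part] else segs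

-- ===== PRECONDITION & SPEC =====
def Spec_parse_bracket_segments_py (part : String) (out : List String) : Prop := out = parse_bracket_segments_py_alt part
instance (part : String) (out : List String) : Decidable (Spec_parse_bracket_segments_py part out) := by unfold Spec_parse_bracket_segments_py; infer_instance

-- ===== CLAIM (what is proved, stated in full; the proofs are below) =====
def Claim_equal_parse_bracket_segments_py : Prop := ∀ (part : String), Dom_parse_bracket_segments_py part → Spec_parse_bracket_segments_py part (parse_bracket_segments_py part)

-- ===== LEMMAS AND PROOFS =====

-- `e ≤ aInner l e inQ qc` 
lemma aInner_ge_aux (l : List Char) : ∀ n e inQ qc, l.length - e = n → e ≤ aInner l e inQ qc := by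
  intro n
  induction n with
  | zero =>
    intro e inQ qc h
    rw [aInner]
    split_ifs with h1 <;> omega
  | succ n ih =>
    intro e inQ qc h
    rw [aInner]
    split_ifs with h1 h2 h3 h4 h5
    · have := ih (e + 1) false qc (by omega); omega
    · have := ih (e + 1) true qc (by omega); omega
    · have := ih (e + 1) true (l[e]) (by omega); omega
    · omega
    · have := ih (e + 1) false qc (by omega); omega
    · omega

lemma aInner_ge (l : List Char) (e : Nat) (inQ : Bool) (qc : Char) :
    e ≤ aInner l e inQ qc := aInner_ge_aux l _ e inQ qc rfl

lemma aInner_le_aux (l : List Char) : ∀ n e inQ qc, l.length - e = n → e ≤ l.length →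
    aInner l e inQ qc ≤ l.length := by
  intro n
  induction n with
  | zero =>
    intro e inQ qc h he
    rw [aInner]
    split_ifs with h1 <;> omega
  | succ n ih =>
    intro e inQ qc h he
    rw [aInner]
    split_ifs with h1 h2 h3 h4 h5
    · exact ih (e + 1) false qc (by omega) (by omega)
    · exact ih (e + 1) true qc (by omega) (by omega)
    · exact ih (e + 1) true (l[e]) (by omega) (by omega)
    · omega
    · exact ih (e + 1) false qc (by omega) (by omega)
    · omega

lemma aInner_le (l : List Char) (e : Nat) (inQ : Bool) (qc : Char) (he : e ≤ l.length) :
    aInner l e inQ qc ≤ l.length := aInner_le_aux l _ e inQ qc rfl he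

lemma bFindAux_shift (s : List Char) : ∀ (a b : Nat) (prev : Char) (inQ : Bool) (qc : Char),
    bFindAux s (a + b) prev inQ qc = (bFindAux s b prev inQ qc).map (a + ·) := by
  induction s with
  | nil => intro a b prev inQ qc; simp [bFindAux]
  | cons c t ih =>
    intro a b prev inQ qc
    simp only [bFindAux]
    split_ifs with h1 h2 h3 h4
    · have : a + b + 1 = a + (b + 1) := by omega
      rw [this, ih]
    · have : a + b + 1 = a + (b + 1) := by omega
      rw [this, ih]
    · have : a + b + 1 = a + (b + 1) := by omega
      rw [this, ih]
    · simp
    · have : a + b + 1 = a + (b + 1) := by omega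
      rw [this, ih]

-- A's inner loop computes, in absolute indices, exactly what B's _find_close computes on the suffix
lemma inner_eq (l : List Char) : ∀ n e inQ qc prev, l.length - e = n → e ≤ l.length →
    prev = l.getD (e - 1) default →
    aInner l e inQ qc =
      (match bFindAux (l.drop e) 0 prev inQ qc with
       | some k => e + k
       | none => l.length) := by
  intro n
  induction n with
  | zero =>
    intro e inQ qc prev h he hprev
    have he' : e = l.length := by omega
    subst he'
    rw [aInner]
    simp [bFindAux]
  | succ n ih =>
    intro e inQ qc prev h he hprev
    have hlt : e < l.length := by omega
    have hdrop : l.drop e = l[e] :: l.drop (e + 1) := List.drop_eq_getElem_cons hlt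
    have hprev' : l[e] = l.getD ((e + 1) - 1) default := by
      simp [List.getD_eq_getElem?_getD, hlt]
    rw [aInner, dif_pos hlt, hdrop]
    simp only [bFindAux, hprev]
    split_ifs with h1 h2 h3 h4
    · rw [ih (e + 1) false qc (l[e]) (by omega) (by omega) hprev']
      have hs : bFindAux (l.drop (e + 1)) 1 (l[e]) false qc =
          (bFindAux (l.drop (e + 1)) 0 (l[e]) false qc).map (1 + ·) :=
        bFindAux_shift (l.drop (e + 1)) 1 0 (l[e]) false qc
      rw [hs]
      cases bFindAux (l.drop (e + 1)) 0 (l[e]) false qc with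
      | none => simp
      | some v => simp; ring
    · rw [ih (e + 1) true qc (l[e]) (by omega) (by omega) hprev']
      have hs : bFindAux (l.drop (e + 1)) 1 (l[e]) true qc =
          (bFindAux (l.drop (e + 1)) 0 (l[e]) true qc).map (1 + ·) :=
        bFindAux_shift (l.drop (e + 1)) 1 0 (l[e]) true qc
      rw [hs]
      cases bFindAux (l.drop (e + 1)) 0 (l[e]) true qc with
      | none => simp
      | some v => simp; ring
    · rw [ih (e + 1) true (l[e]) (l[e]) (by omega) (by omega) hprev']
      have hs : bFindAux (l.drop (e + 1)) 1 (l[e]) true (l[e]) =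
          (bFindAux (l.drop (e + 1)) 0 (l[e]) true (l[e])).map (1 + ·) :=
        bFindAux_shift (l.drop (e + 1)) 1 0 (l[e]) true (l[e])
      rw [hs]
      cases bFindAux (l.drop (e + 1)) 0 (l[e]) true (l[e]) with
      | none => simp
      | some v => simp; ring
    · simp
    · rw [ih (e + 1) false qc (l[e]) (by omega) (by omega) hprev']
      have hs : bFindAux (l.drop (e + 1)) 1 (l[e]) false qc =
          (bFindAux (l.drop (e + 1)) 0 (l[e]) false qc).map (1 + ·) :=
        bFindAux_shift (l.drop (e + 1)) 1 0 (l[e]) false qc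
      rw [hs]
      cases bFindAux (l.drop (e + 1)) 0 (l[e]) false qc with
      | none => simp
      | some v => simp; ring

-- if no '[' occurs at positions start ≤ m < i, the prefix of the suffix has no '['
lemma findIdx_take_none (l : List Char) (start i : Nat)
    (hinv : ∀ m (_ : m < l.length), start ≤ m → m < i → l[m] ≠ '[') :
    ((l.drop start).take (i - start)).findIdx? (· == '[') = none := by
  rw [List.findIdx?_eq_none_iff]
  intro x hx
  rw [List.mem_iff_getElem] at hx
  obtain ⟨m', hm', hx⟩ := hx
  have hm'2 : m' < (l.drop start).length := by
    have := hm'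
    simp only [List.length_take] at this
    omega
  have h1 : ((l.drop start).take (i - start))[m'] = (l.drop start)[m'] := List.getElem_take
  have h2 : (l.drop start)[m'] = l[start + m']'(by simp at hm'2 ⊢; omega) := List.getElem_drop ..
  have hm'3 : m' < i - start := by simp only [List.length_take] at hm'; omega
  have hne := hinv (start + m') (by simp at hm'2; omega) (by omega) (by omega)
  rw [h1, h2] at hx
  subst hx
  simp [hne]

lemma outer_exit (l : List Char) (start i : Nat) (segs : List String)
    (hsi : start ≤ i) (hil : l.length ≤ i)
    (hinv : ∀ m (_ : m < l.length), start ≤ m → m < i → l[m] ≠ '[') :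
    (if start < l.length then segs ++ [String.mk (l.drop start)] else segs)
      = bOuter (l.drop start) segs := by
  rw [bOuter]
  by_cases hs : start < l.length
  · have hne : l.drop start ≠ [] := by
      intro hcon
      rw [List.drop_eq_nil_iff] at hcon
      omega
    have hcond : (l.drop start).isEmpty = false := by
      cases hdl : l.drop start with
      | nil => exact absurd hdl hne
      | cons a t => rfl
    rw [if_pos hs]
    simp only [hcond, Bool.false_eq_true, if_false]
    have hwhole : (l.drop start).take (i - start) = l.drop start :=
      List.take_of_length_le (by simp; omega)
    have hfind : (l.drop start).findIdx? (· == '[') = none := by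
      rw [← hwhole]
      exact findIdx_take_none l start i hinv
    rw [hfind]
  · have hempty : l.drop start = [] := by
      rw [List.drop_eq_nil_iff]
      omega
    rw [if_neg hs, if_pos (by rw [hempty]; rfl)]

lemma outer_eq (l : List Char) : ∀ (fuel start i : Nat) (segs : List String),
    l.length + 1 - i ≤ fuel → start ≤ i →
    (∀ m (_ : m < l.length), start ≤ m → m < i → l[m] ≠ '[') →
    aOuter l fuel start i segs = bOuter (l.drop start) segs := by
  intro fuel
  induction fuel with
  | zero =>
    intro start i segs hn hsi hinv
    rw [aOuter]
    exact outer_exit l start i segs hsi (by omega) hinv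
  | succ fuel ihf =>
    intro start i segs hn hsi hinv
    rw [aOuter]
    by_cases hil : i < l.length
    · rw [dif_pos hil]
      by_cases hbr : l[i] = '['
      · -- found '[': both sides append the pending prefix and the bracket content
        rw [if_pos (by simp [hbr])]
        have htd : l.drop start = (l.drop start).take (i - start) ++ l.drop i := by
          conv_lhs => rw [← List.take_append_drop (i - start) (l.drop start)]
          rw [List.drop_drop]
          congr 1
          congr 1
          omega
        have hfind : (l.drop start).findIdx? (· == '[') = some (i - start) := by
          rw [htd, List.findIdx?_append, findIdx_take_none l start i hinv]
          rw [List.drop_eq_getElem_cons hil, List.findIdx?_cons]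
          simp [hbr, List.length_take]
          omega
        rw [bOuter]
        have hne : l.drop start ≠ [] := by
          intro hcon
          rw [List.drop_eq_nil_iff] at hcon
          omega
        have hcond : (l.drop start).isEmpty = false := by
          cases hdl : l.drop start with
          | nil => exact absurd hdl hne
          | cons a t => rfl
        simp only [hcond, Bool.false_eq_true, if_false]
        rw [hfind]
        simp only []
        have hj : (0 < i - start) = (start < i) := propext (by omega)
        simp only [hj]
        have hrest2 : (l.drop start).drop (i - start + 1) = l.drop (i + 1) := by
          rw [List.drop_drop]
          congr 1
          omega
        rw [hrest2]
        have he := inner_eq l _ (i + 1) false (Char.ofNat 0) '[' rfl (by omega)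
          (by simp [List.getD_eq_getElem?_getD, hil, hbr])
        have hle := aInner_le l (i + 1) false (Char.ofNat 0) (by omega)
        have hge := aInner_ge l (i + 1) false (Char.ofNat 0)
        cases hk : bFindAux (l.drop (i + 1)) 0 '[' false (Char.ofNat 0) with
        | none =>
          have hbf : bFind (l.drop (i + 1)) = none := by rw [bFind, hk]
          simp only [hbf]
          rw [hk] at he
          simp only at he
          -- aInner reached the end of the string: final trailing append, then the loop exits
          have htake : (l.drop (i + 1)).take (aInner l (i + 1) false (Char.ofNat 0) - (i + 1)) =
              l.drop (i + 1) := by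
            rw [he]
            apply List.take_of_length_le
            simp
          rw [htake]
          -- at start = i = l.length + 1 the recursive call returns segs unchanged
          rw [he]
          rw [ihf (l.length + 1) (l.length + 1) _ (by omega) (le_refl _)
            (fun m hm h1 h2 => by omega)]
          rw [List.drop_eq_nil_of_le (by omega), bOuter]
          rfl
        | some k =>
          have hbf : bFind (l.drop (i + 1)) = some k := by rw [bFind, hk]
          simp only [hbf]
          rw [hk] at he
          simp only at he
          have htake : (l.drop (i + 1)).take (aInner l (i + 1) false (Char.ofNat 0) - (i + 1)) =
              (l.drop (i + 1)).take k := by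
            have hek : i + 1 + k - (i + 1) = k := by omega
            rw [he, hek]
          rw [htake]
          have hdd : (l.drop (i + 1)).drop (k + 1) = l.drop (aInner l (i + 1) false (Char.ofNat 0) + 1) := by
            rw [List.drop_drop, ← Nat.add_assoc, ← he]
          rw [hdd]
          apply ihf _ _ _ (by clear he hk hbf htake hdd; omega) (le_refl _)
          intro m _ hm1 hm2
          omega
      · -- ordinary character: A advances i, B's suffix is unchanged
        rw [if_neg (by simp [hbr])]
        apply ihf start (i + 1) segs (by omega) (by omega)
        intro m hm hm1 hm2
        by_cases hmi : m = i
        · subst hmi; exact hbr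
        · exact hinv m hm hm1 (by omega)
    · rw [dif_neg hil]
      exact outer_exit l start i segs hsi (by omega) hinv

-- ===== VERDICT (by name: the statement is the Claim_ definition above) =====
theorem parse_bracket_segments_py_spec : Claim_equal_parse_bracket_segments_py := by
  intro part _
  unfold Spec_parse_bracket_segments_py parse_bracket_segments_py parse_bracket_segments_py_alt
  have h := outer_eq part.toList (part.toList.length + 1) 0 0 [] (by omega) (le_refl 0)
    (fun m _ _ h2 => absurd h2 (by omega))
  simp only [List.drop_zero] at h
  rw [h]
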